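-- pv_equiv track=rewrite | github.com/pypi-data/pypi-mirror-395 | packages/flashcam/flashcam-1.13.20.tar.gz/flashcam-1.13.20/flashcam/real_camera.py | leftmost_txt_wid
-- ===== SOURCE A (Python) =====
-- def leftmost_txt_wid( txt ):
--     minx = int(640/2)
--     lines = str(txt)
--     if lines.find("\n")<0:
--         lines = [txt]
--     else:
--         lines = lines.split("\n")
--     for i in lines:
--         posx = int(640/2 - len( str(i) )*32/2)
--         if posx<minx:
--             minx = posx
--     return minx
-- ===== SOURCE B (Python) =====
-- def leftmost_txt_wid(txt):
--     # Single character-level scan: track the current line length and the best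
--     # (longest) line length seen so far; never builds the list of lines.
--     best = cur = 0
--     for ch in str(txt):
--         if ch == "\n":
--             if cur > best:
--                 best = cur
--             cur = 0
--         else:
--             cur += 1
--     if cur > best:
--         best = cur
--     return 320 - 16 * best
-- ===== Notes on version B (the rewrite author's own statement) =====
-- stated objective: alternative
-- what changed: Replaces A's split-into-lines preamble plus running-minimum loop over per-line positions by a single character-level scan that tracks the current and longest line length, never materializing the list of lines, then applies the centering arithmetic once.
import Mathlib
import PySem

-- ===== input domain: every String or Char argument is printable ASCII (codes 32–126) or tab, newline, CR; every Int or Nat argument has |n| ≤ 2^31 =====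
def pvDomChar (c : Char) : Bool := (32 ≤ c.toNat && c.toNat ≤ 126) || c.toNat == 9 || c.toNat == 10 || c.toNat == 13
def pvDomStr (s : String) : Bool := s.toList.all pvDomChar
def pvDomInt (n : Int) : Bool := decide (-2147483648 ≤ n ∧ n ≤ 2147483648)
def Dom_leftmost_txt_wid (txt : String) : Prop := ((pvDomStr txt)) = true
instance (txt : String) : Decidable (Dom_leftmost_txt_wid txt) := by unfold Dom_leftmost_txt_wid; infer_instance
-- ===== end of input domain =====

-- B replaces A's split-into-lines + running-minimum loop by a single character-level
-- scan that tracks the current and longest line length; same cost, simpler (no line list).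

-- ===== PORT A =====
-- int(640/2 - len*32/2) = 320 - 16*len exactly (the float arithmetic is exact at these magnitudes).
def leftmost_txt_wid (txt : String) : Int :=
  let s := txt
  let lines := if PySem.Str.find s "\n" < 0 then [txt] else (PySem.Str.split? s "\n").getD []
  lines.foldl (fun minx i =>
    let posx : Int := 320 - (PySem.Str.len i : Int) * 16
    if posx < minx then posx else minx) 320

-- ===== PORT B =====
-- one pass over the characters with state (best, cur); final flush of the last line.
def leftmost_txt_wid_alt (txt : String) : Int :=
  let p := txt.toList.foldl
    (fun (st : Int × Int) ch =>
      if ch = '\n' then ((if st.2 > st.1 then st.2 else st.1), 0)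
      else (st.1, st.2 + 1)) (0, 0)
  let best := if p.2 > p.1 then p.2 else p.1
  320 - 16 * best

-- ===== PRECONDITION & SPEC =====
def Spec_leftmost_txt_wid (txt : String) (out : Int) : Prop := out = leftmost_txt_wid_alt txt
instance (txt : String) (out : Int) : Decidable (Spec_leftmost_txt_wid txt out) := by unfold Spec_leftmost_txt_wid; infer_instance

-- ===== CLAIM (what is proved, stated in full; the proofs are below) =====
def Claim_equal_leftmost_txt_wid : Prop := ∀ (txt : String), Dom_leftmost_txt_wid txt → Spec_leftmost_txt_wid txt (leftmost_txt_wid txt)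

-- ===== LEMMAS AND PROOFS =====

-- reference splitting of a char list at '\n' (always nonempty)
def splitNL : List Char → List (List Char)
  | [] => [[]]
  | c :: rest =>
    if c = '\n' then [] :: splitNL rest
    else match splitNL rest with
      | h :: t => (c :: h) :: t
      | [] => [[c]]

lemma splitNL_ne_nil (l : List Char) : splitNL l ≠ [] := by
  cases l with
  | nil => simp [splitNL]
  | cons c rest =>
    simp only [splitNL]
    split_ifs
    · simp
    · cases h : splitNL rest <;> simp

lemma splitNL_headI_tail (l : List Char) :
    (splitNL l).headI :: (splitNL l).tail = splitNL l := by
  cases h : splitNL l with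
  | nil => exact absurd h (splitNL_ne_nil l)
  | cons a t => simp

-- PySem's fuel-based splitOn at separator "\n" computes splitNL
lemma splitOn_go_eq (l : List Char) : ∀ (fuel : Nat), l.length < fuel →
    ∀ (cur : List Char) (acc : List (List Char)),
    PySem.Chars.splitOn.go ['\n'] fuel l cur acc
      = acc.reverse ++ (cur.reverse ++ (splitNL l).headI) :: (splitNL l).tail := by
  induction l with
  | nil =>
    intro fuel hf cur acc
    cases fuel with
    | zero => omega
    | succ f => simp [PySem.Chars.splitOn.go, splitNL]
  | cons c rest ih =>
    intro fuel hf cur acc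
    cases fuel with
    | zero => omega
    | succ f =>
      rw [PySem.Chars.splitOn.go]
      by_cases hc : c = '\n'
      · subst hc
        have hpre : ['\n'].isPrefixOf ('\n' :: rest) = true := by
          simp [List.isPrefixOf]
        simp only [hpre, if_true, List.drop_succ_cons, List.drop_zero, List.length_singleton]
        rw [ih f (by simpa using hf) [] (cur.reverse :: acc)]
        simp [splitNL, splitNL_headI_tail]
      · have hpre : ['\n'].isPrefixOf (c :: rest) = false := by
          simp [List.isPrefixOf]
          intro h; exact hc h.symm
        simp only [hpre, Bool.false_eq_true, if_false]
        rw [ih f (by simpa using hf) (c :: cur) acc]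
        simp only [splitNL, hc, if_false]
        cases h : splitNL rest with
        | nil => exact absurd h (splitNL_ne_nil rest)
        | cons a t => simp

lemma splitOn_eq_splitNL (l : List Char) :
    PySem.Chars.splitOn l ['\n'] = splitNL l := by
  unfold PySem.Chars.splitOn
  rw [splitOn_go_eq l (l.length + 1) (by omega) [] []]
  simpa using splitNL_headI_tail l

lemma splitNL_no_newline (l : List Char) (h : '\n' ∉ l) : splitNL l = [l] := by
  induction l with
  | nil => rfl
  | cons c rest ih =>
    simp only [List.mem_cons, not_or] at h
    simp only [splitNL, Ne.symm h.1, if_false, ih h.2]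

-- A's loop from accumulator 320 - 16*k computes 320 - 16 * (running max of lengths seeded with k)
lemma loopA_eq_max (ls : List String) (k : Int) :
    ls.foldl (fun minx i =>
      let posx : Int := 320 - (PySem.Str.len i : Int) * 16
      if posx < minx then posx else minx) (320 - 16 * k)
    = 320 - 16 * ((ls.map (fun i => PySem.Str.len i)).foldl max k) := by
  induction ls generalizing k with
  | nil => simp
  | cons h t ih =>
    simp only [List.foldl_cons, List.map_cons]
    have hstep : (if (320 - (PySem.Str.len h : Int) * 16) < 320 - 16 * k
        then 320 - (PySem.Str.len h : Int) * 16 else 320 - 16 * k)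
        = 320 - 16 * (max k (PySem.Str.len h)) := by
      rcases le_total k (PySem.Str.len h) with hle | hle
      · rw [max_eq_right hle]; split_ifs <;> omega
      · rw [max_eq_left hle]; split_ifs with hc
        · exfalso; omega
        · rfl
    rw [hstep, ih]

-- B's scan from state (best, cur) computes the running max over the line lengths of splitNL,
-- the first line extended by cur.
lemma scanB_eq (l : List Char) : ∀ (best cur : Int),
    (let p := l.foldl
        (fun (st : Int × Int) ch =>
          if ch = '\n' then ((if st.2 > st.1 then st.2 else st.1), 0)
          else (st.1, st.2 + 1)) (best, cur)
     if p.2 > p.1 then p.2 else p.1)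
    = ((cur + ((splitNL l).headI.length : Int)) ::
        (splitNL l).tail.map (fun cs => (cs.length : Int))).foldl max best := by
  induction l with
  | nil =>
    intro best cur
    simp only [List.foldl_nil, splitNL, List.headI, List.tail, List.map_nil,
      List.foldl_cons, List.length_nil]
    rw [max_def]
    split_ifs <;> omega
  | cons c rest ih =>
    intro best cur
    by_cases hc : c = '\n'
    · subst hc
      simp only [List.foldl_cons, if_true, splitNL, List.headI, List.tail]
      rw [ih (if cur > best then cur else best) 0]
      have hmax : (if cur > best then cur else best) = max best cur := by
        rw [max_def]; split_ifs <;> omega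
      rw [hmax]
      cases h : splitNL rest with
      | nil => exact absurd h (splitNL_ne_nil rest)
      | cons a t => simp
    · simp only [List.foldl_cons, hc, if_false]
      rw [ih best (cur + 1)]
      simp only [splitNL, hc, if_false]
      cases h : splitNL rest with
      | nil => exact absurd h (splitNL_ne_nil rest)
      | cons a t =>
        simp only [List.headI, List.tail, List.length_cons, List.foldl_cons]
        have : cur + 1 + (a.length : Int) = cur + ((a.length + 1 : Nat) : Int) := by
          push_cast; ring
        rw [this]

-- both ports equal 320 - 16 * (max line length over splitNL)
lemma portA_closed (txt : String) :
    leftmost_txt_wid txt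
      = 320 - 16 * (((splitNL txt.toList).map (fun cs => (cs.length : Int))).foldl max 0) := by
  unfold leftmost_txt_wid
  by_cases hf : PySem.Str.find txt "\n" < 0
  · have hne : ¬ ['\n'] <:+: txt.toList := by
      have h1 : PySem.Str.find txt "\n" = -1 := by
        have := PySem.Chars.neg_one_le_find txt.toList "\n".toList
        simp only [PySem.Str.find_eq] at hf ⊢
        omega
      rw [PySem.Str.find_eq] at h1
      exact (PySem.Chars.find_eq_neg_one_iff _ _).mp h1
    have hmem : '\n' ∉ txt.toList := by
      intro hm; exact hne ((List.singleton_infix_iff _ _).mpr hm)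
    simp only [hf, if_true]
    have := loopA_eq_max [txt] 0
    simp only [mul_zero, sub_zero] at this
    rw [this, splitNL_no_newline _ hmem]
    simp [PySem.Str.len_eq]
  · simp only [hf, if_false]
    have hsplit : PySem.Str.split? txt "\n" = some ((splitNL txt.toList).map String.ofList) := by
      unfold PySem.Str.split?
      simp [PySem.Chars.split?, List.isEmpty, splitOn_eq_splitNL]
    rw [hsplit]
    simp only [Option.getD_some]
    have := loopA_eq_max ((splitNL txt.toList).map String.ofList) 0
    simp only [mul_zero, sub_zero] at this
    rw [this]
    congr 1
    congr 1
    congr 1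
    rw [List.map_map]
    apply List.map_congr_left
    intro cs _
    simp [PySem.Str.len_eq]

lemma portB_closed (txt : String) :
    leftmost_txt_wid_alt txt
      = 320 - 16 * (((splitNL txt.toList).map (fun cs => (cs.length : Int))).foldl max 0) := by
  simp only [leftmost_txt_wid_alt]
  rw [scanB_eq txt.toList 0 0]
  congr 2
  cases h : splitNL txt.toList with
  | nil => exact absurd h (splitNL_ne_nil _)
  | cons a t => simp

-- ===== VERDICT (by name: the statement is the Claim_ definition above) =====
theorem leftmost_txt_wid_spec : Claim_equal_leftmost_txt_wid := by
  intro txt _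
  unfold Spec_leftmost_txt_wid
  rw [portA_closed, portB_closed]
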